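-- pv_equiv track=rewrite | github.com/vpuri3/causal-flare | causal_flare/autoregressive/stablemax_triton.py | _stablemax_pick_allowed_block_k
-- ===== SOURCE A (Python) =====
-- def _stablemax_pick_allowed_block_k(D: int) -> int:
--     if D in (32, 64, 128, 256):
--         return D
--     for candidate in (256, 128, 64, 32):
--         if D % candidate == 0:
--             return candidate
--     raise ValueError(
--         "FLAREAutoregressiveStablemaxTriton requires D_score to be divisible by one of "
--         "{32, 64, 128, 256}. "
--         f"Got D_score={D}."
--     )
-- ===== SOURCE B (Python) =====
-- import math
--
-- def _stablemax_pick_allowed_block_k(D: int) -> int: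
--     g = math.gcd(D, 256)
--     if g >= 32:
--         return g
--     raise ValueError(
--         "FLAREAutoregressiveStablemaxTriton requires D_score to be divisible by one of "
--         "{32, 64, 128, 256}. "
--         f"Got D_score={D}."
--     )
-- ===== Notes on version B (the rewrite author's own statement) =====
-- stated objective: idiomatic
-- what changed: Replaces the membership test plus candidate loop with a single math.gcd(D, 256) computation: the largest power of two up to 256 dividing D is the answer whenever it is at least 32.
import Mathlib
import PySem

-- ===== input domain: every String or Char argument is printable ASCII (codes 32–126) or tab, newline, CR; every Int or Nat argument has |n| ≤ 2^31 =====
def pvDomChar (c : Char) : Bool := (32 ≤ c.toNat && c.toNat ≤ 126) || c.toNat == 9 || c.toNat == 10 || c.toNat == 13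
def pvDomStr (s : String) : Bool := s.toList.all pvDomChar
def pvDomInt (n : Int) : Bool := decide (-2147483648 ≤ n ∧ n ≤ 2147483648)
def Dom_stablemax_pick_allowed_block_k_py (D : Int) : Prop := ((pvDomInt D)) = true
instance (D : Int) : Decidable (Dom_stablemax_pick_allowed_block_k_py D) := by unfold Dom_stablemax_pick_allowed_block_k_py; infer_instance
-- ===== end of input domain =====

-- B replaces A's membership test + candidate loop by a single gcd(D, 256) computation (idiomatic; same O(1) cost).

-- ===== PORT A =====
-- literal transliteration: the 4-tuple membership test, then the loop over (256,128,64,32)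
-- unrolled in order; the final 0 stands for the ValueError branch, excluded by Pre_.
def stablemax_pick_allowed_block_k_py (D : Int) : Int :=
  if D = 32 ∨ D = 64 ∨ D = 128 ∨ D = 256 then D
  else if PySem.Int.mod D 256 = 0 then 256
  else if PySem.Int.mod D 128 = 0 then 128
  else if PySem.Int.mod D 64 = 0 then 64
  else if PySem.Int.mod D 32 = 0 then 32
  else 0

-- ===== PORT B =====
-- g = math.gcd(D, 256); return g if g >= 32 else raise (raise branch = 0, excluded by Pre_)
def stablemax_pick_allowed_block_k_py_alt (D : Int) : Int :=
  let g : Int := Int.gcd D 256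
  if g ≥ 32 then g else 0

-- ===== PRECONDITION & SPEC =====
-- Pre_: exactly the inputs on which the Python A returns (otherwise both A and B raise the same ValueError).
def Pre_stablemax_pick_allowed_block_k_py (D : Int) : Prop := PySem.Int.mod D 32 = 0
instance (D : Int) : Decidable (Pre_stablemax_pick_allowed_block_k_py D) := by unfold Pre_stablemax_pick_allowed_block_k_py; infer_instance
def pvWitness_stablemax_pick_allowed_block_k_py : Int := 96

def Spec_stablemax_pick_allowed_block_k_py (D : Int) (out : Int) : Prop := out = stablemax_pick_allowed_block_k_py_alt D
instance (D : Int) (out : Int) : Decidable (Spec_stablemax_pick_allowed_block_k_py D out) := by unfold Spec_stablemax_pick_allowed_block_k_py; infer_instance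

-- ===== CLAIM (what is proved, stated in full; the proofs are below) =====
def Claim_equal_stablemax_pick_allowed_block_k_py : Prop := ∀ (D : Int), Dom_stablemax_pick_allowed_block_k_py D → Pre_stablemax_pick_allowed_block_k_py D → Spec_stablemax_pick_allowed_block_k_py D (stablemax_pick_allowed_block_k_py D)

-- ===== LEMMAS AND PROOFS =====

-- PySem.Int.mod with a positive divisor is Lean's Int.emod
theorem pymod_eq_emod (a b : Int) (hb : 0 < b) : PySem.Int.mod a b = a % b := by
  simp [PySem.Int.mod, Int.fmod_eq_emod]
  omega

-- gcd with 256 only depends on D mod 256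
theorem gcd_256_emod (D : Int) : Int.gcd D 256 = Int.gcd (D % 256) 256 := by
  rw [Int.gcd_emod]

theorem mod_factor (D : Int) (c : Int) (hdvd : c ∣ (256:Int)) :
    D % c = (D % 256) % c := by
  rw [Int.emod_emod_of_dvd D hdvd]

theorem stablemax_pick_allowed_block_k_py_spec : Claim_equal_stablemax_pick_allowed_block_k_py := by
  intro D _ hpre
  unfold Spec_stablemax_pick_allowed_block_k_py
  by_cases hm : D = 32 ∨ D = 64 ∨ D = 128 ∨ D = 256
  · rcases hm with h | h | h | h <;> subst h <;> decide
  · unfold Pre_stablemax_pick_allowed_block_k_py at hpre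
    rw [pymod_eq_emod D 32 (by norm_num)] at hpre
    unfold stablemax_pick_allowed_block_k_py stablemax_pick_allowed_block_k_py_alt
    rw [if_neg hm,
        pymod_eq_emod D 256 (by norm_num), pymod_eq_emod D 128 (by norm_num),
        pymod_eq_emod D 64 (by norm_num), pymod_eq_emod D 32 (by norm_num),
        mod_factor D 128 (by norm_num),
        mod_factor D 64 (by norm_num),
        mod_factor D 32 (by norm_num), gcd_256_emod]
    rw [mod_factor D 32 (by norm_num)] at hpre
    conv_lhs => rw [mod_factor D 256 (by norm_num)]
    set r := D % 256 with hr
    have hrange : 0 ≤ r ∧ r < 256 := ⟨Int.emod_nonneg D (by norm_num), Int.emod_lt_of_pos D (by norm_num)⟩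
    have : r = 0 ∨ r = 32 ∨ r = 64 ∨ r = 96 ∨ r = 128 ∨ r = 160 ∨ r = 192 ∨ r = 224 := by omega
    rcases this with h | h | h | h | h | h | h | h <;> rw [h] <;> decide
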